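-- pv_equiv track=rewrite | github.com/dhyey-69/LeetCode | 763.py | xyz
-- ===== SOURCE A (Python) =====
-- def xyz(s):
--     last_index = {char: idx for idx, char in enumerate(s)}
--
--     partitions = []
--     start, end = 0, 0
--
--     for i, char in enumerate(s):
--         end = max(end, last_index[char])
--
--         if i == end:
--             partitions.append(end - start + 1)
--             start = i + 1
--
--     return partitions
-- ===== SOURCE B (Python) =====
-- def xyz(s):
--     n = len(s)
--     cuts = [i for i in range(n) if all(c not in s[i+1:] for c in s[:i+1])]
--     sizes = []
--     prev = -1
--     for c in cuts:
--         sizes.append(c - prev)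
--         prev = c
--     return sizes
-- ===== Notes on version B (the rewrite author's own statement) =====
-- stated objective: alternative
-- what changed: Replaces A's single-pass sweep (last-occurrence dict plus a running max that detects partition ends) with a declarative formulation: an index is a partition boundary iff the prefix through it is disjoint from the remaining suffix; partition sizes are differences of consecutive boundary indices.
import Mathlib
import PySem

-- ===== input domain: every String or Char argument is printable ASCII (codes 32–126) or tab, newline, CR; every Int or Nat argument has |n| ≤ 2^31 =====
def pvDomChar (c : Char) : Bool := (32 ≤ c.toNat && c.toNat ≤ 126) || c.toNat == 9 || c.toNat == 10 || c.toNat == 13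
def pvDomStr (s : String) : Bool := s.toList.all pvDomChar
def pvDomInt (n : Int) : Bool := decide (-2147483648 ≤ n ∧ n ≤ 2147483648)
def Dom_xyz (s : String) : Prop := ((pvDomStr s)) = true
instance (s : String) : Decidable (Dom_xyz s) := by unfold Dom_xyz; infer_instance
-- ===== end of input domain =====

-- B rewrites A's running-max sweep as a declarative cut-point formulation: an index is a
-- partition boundary iff the prefix through it shares no character with the rest of the
-- string; sizes are differences of consecutive boundaries (objective: alternative, not faster).

-- ===== PORT A =====
-- {char: idx for idx, char in enumerate(s)}
def xyzLastIndex (cs : List Char) : PySem.Dict Char Int :=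
  (PySem.List.enumerate cs 0).foldl (fun d p => d.insert p.2 p.1) PySem.Dict.empty

-- loop body; last_index[char] is a lookup whose key is always present (char ∈ s), ported as getD
def xyzStep (li : PySem.Dict Char Int) (st : List Int × Int × Int) (p : Int × Char) :
    List Int × Int × Int :=
  let e := max st.2.2 (li.getD p.2 0)
  if p.1 == e then (st.1 ++ [e - st.2.1 + 1], p.1 + 1, e) else (st.1, st.2.1, e)

def xyz (s : String) : List Int :=
  let cs := s.toList
  let li := xyzLastIndex cs
  ((PySem.List.enumerate cs 0).foldl (xyzStep li) ([], 0, 0)).1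

-- ===== PORT B =====
def xyz_alt (s : String) : List Int :=
  let cs := s.toList
  let n : Int := cs.length
  let cuts := (PySem.List.pyRange 0 n 1).filter
    (fun i => (PySem.List.slice cs none (some (i+1))).all
        (fun c => !((PySem.List.slice cs (some (i+1)) none).contains c)))
  (cuts.foldl (fun (st : List Int × Int) c => (st.1 ++ [c - st.2], c)) (([] : List Int), -1)).1

-- ===== PRECONDITION & SPEC =====
def Spec_xyz (s : String) (out : List Int) : Prop := out = xyz_alt s
instance (s : String) (out : List Int) : Decidable (Spec_xyz s out) := by unfold Spec_xyz; infer_instance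

-- ===== CLAIM (what is proved, stated in full; the proofs are below) =====
def Claim_equal_xyz : Prop := ∀ (s : String), Dom_xyz s → Spec_xyz s (xyz s)

-- ===== LEMMAS AND PROOFS =====

-- index of the LAST occurrence of c in cs (meaningful when c ∈ cs)
def lastPos : List Char → Char → Nat
  | [], _ => 0
  | _ :: xs, c => if c ∈ xs then lastPos xs c + 1 else 0

-- boundary predicate: prefix through k shares no character with the suffix after k
def Pb (cs : List Char) (k : Nat) : Bool :=
  (cs.take (k+1)).all (fun c => !((cs.drop (k+1)).contains c))

def cutsN (cs : List Char) (m : Nat) : List Nat := (List.range m).filter (Pb cs)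

def diffs : Int → List Int → List Int
  | _, [] => []
  | p, c :: l => (c - p) :: diffs c l

lemma getD_fold_not_mem (cs : List Char) (k : Int) (d : PySem.Dict Char Int) (c : Char)
    (h : c ∉ cs) :
    ((PySem.List.enumerate cs k).foldl (fun d p => d.insert p.2 p.1) d).getD c 0 = d.getD c 0 := by
  induction cs generalizing k d with
  | nil => simp [PySem.List.enumerate_nil]
  | cons x xs ih =>
    simp only [PySem.List.enumerate_cons, List.foldl_cons]
    rw [ih _ _ (fun hx => h (List.mem_cons_of_mem _ hx))]
    rw [PySem.Dict.getD_insert]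
    simp only [List.mem_cons, not_or] at h
    simp [h.1]

lemma getD_fold_mem (cs : List Char) (k : Int) (d : PySem.Dict Char Int) (c : Char)
    (h : c ∈ cs) :
    ((PySem.List.enumerate cs k).foldl (fun d p => d.insert p.2 p.1) d).getD c 0
      = k + lastPos cs c := by
  induction cs generalizing k d with
  | nil => simp at h
  | cons x xs ih =>
    simp only [PySem.List.enumerate_cons, List.foldl_cons]
    by_cases hm : c ∈ xs
    · rw [ih _ _ hm, lastPos]
      simp [hm]; ring
    · have hcx : c = x := by
        rcases List.mem_cons.mp h with h' | h'
        · exact h'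
        · exact absurd h' hm
      subst hcx
      rw [getD_fold_not_mem _ _ _ _ hm, PySem.Dict.getD_insert_self, lastPos]
      simp [hm]

lemma gl2 (c p : Int) (l : List Int) : (c :: l).getLastD p = l.getLastD c := by
  cases l with
  | nil => rfl
  | cons h t =>
    rw [List.getLastD_eq_getLast?, List.getLastD_eq_getLast?, List.getLast?_cons_cons,
      List.getLast?_eq_some_getLast (l := h :: t) (by simp)]
    rfl

lemma foldB (l : List Int) (acc : List Int) (prev : Int) :
    (l.foldl (fun (st : List Int × Int) c => (st.1 ++ [c - st.2], c)) (acc, prev))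
      = (acc ++ diffs prev l, l.getLastD prev) := by
  induction l generalizing acc prev with
  | nil => simp [diffs]
  | cons c l ih =>
    rw [List.foldl_cons, ih, gl2]
    simp [diffs]

lemma diffs_append (p x : Int) (l : List Int) :
    diffs p (l ++ [x]) = diffs p l ++ [x - l.getLastD p] := by
  induction l generalizing p with
  | nil => simp [diffs]
  | cons c l ih =>
    simp only [List.cons_append, diffs]
    rw [ih, gl2]

lemma lastPos_le_iff (cs : List Char) (c : Char) (h : c ∈ cs) (m : Nat) :
    lastPos cs c ≤ m ↔ c ∉ cs.drop (m+1) := by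
  induction cs generalizing m with
  | nil => simp at h
  | cons x xs ih =>
    by_cases hm : c ∈ xs
    · rw [lastPos]
      simp only [hm, if_true]
      cases m with
      | zero => simp [hm]
      | succ m' =>
        have := ih hm m'
        simpa [Nat.succ_le_succ_iff] using this
    · have hcx : c = x := by
        rcases List.mem_cons.mp h with h' | h'
        · exact h'
        · exact absurd h' hm
      rw [lastPos]
      simp only [hm, if_false]
      constructor
      · intro _ hc
        exact hm (List.mem_of_mem_drop hc)
      · intro _; exact Nat.zero_le _

lemma lastPos_ge (cs : List Char) (j : Nat) (hj : j < cs.length) :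
    j ≤ lastPos cs (cs.getD j 'a') := by
  have hget : cs.getD j 'a' = cs[j] := List.getD_eq_getElem cs 'a' hj
  have hmem : cs[j] ∈ cs := List.getElem_mem hj
  cases j with
  | zero => exact Nat.zero_le _
  | succ j' =>
    rw [hget]
    by_contra hlt
    push_neg at hlt
    have hle : lastPos cs cs[j'+1] ≤ j' := Nat.lt_succ_iff.mp hlt
    have := (lastPos_le_iff cs _ hmem j').mp hle
    apply this
    have hdrop : cs.drop (j'+1) = cs[j'+1] :: cs.drop (j'+2) := List.drop_eq_getElem_cons hj
    rw [hdrop]; exact List.mem_cons_self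

lemma foldl_max_le_iff (f : Nat → Int) (l : List Nat) (a K : Int) :
    (l.foldl (fun e k => max e (f k)) a ≤ K) ↔ (a ≤ K ∧ ∀ x ∈ l, f x ≤ K) := by
  induction l generalizing a with
  | nil => simp
  | cons x l ih =>
    simp only [List.foldl_cons, ih, max_le_iff, List.mem_cons]
    constructor
    · rintro ⟨⟨h1, h2⟩, h3⟩
      refine ⟨h1, ?_⟩
      rintro y (rfl | hy)
      · exact h2
      · exact h3 y hy
    · rintro ⟨h1, h2⟩
      exact ⟨⟨h1, h2 x (Or.inl rfl)⟩, fun y hy => h2 y (Or.inr hy)⟩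

lemma le_foldl_max' (f : Nat → Int) (l : List Nat) (a : Int) :
    a ≤ l.foldl (fun e k => max e (f k)) a ∧
      ∀ x ∈ l, f x ≤ l.foldl (fun e k => max e (f k)) a :=
  (foldl_max_le_iff f l a _).mp le_rfl

-- running max of last positions over the first m indices (A's `end` variable)
def maxLp (cs : List Char) (m : Nat) : Int :=
  (List.range m).foldl (fun e k => max e ((lastPos cs (cs.getD k 'a') : Int))) 0

lemma Pb_iff (cs : List Char) (m : Nat) (hm : m < cs.length) :
    Pb cs m = true ↔ ∀ k ≤ m, lastPos cs (cs.getD k 'a') ≤ m := by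
  unfold Pb
  rw [List.all_eq_true]
  constructor
  · intro h k hk
    have hkn : k < cs.length := lt_of_le_of_lt hk hm
    have hget : cs.getD k 'a' = cs[k] := List.getD_eq_getElem cs 'a' hkn
    have hmemtake : cs[k] ∈ cs.take (m+1) := by
      have hk' : k < (cs.take (m+1)).length := by
        simp [List.length_take]; omega
      have : (cs.take (m+1))[k] = cs[k] := List.getElem_take
      rw [← this]; exact List.getElem_mem hk'
    have := h _ hmemtake
    simp only [Bool.not_eq_eq_eq_not, Bool.not_true, List.contains_eq_mem,
      decide_eq_false_iff_not] at this
    rw [hget]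
    exact (lastPos_le_iff cs _ (List.getElem_mem hkn) m).mpr this
  · intro h c hc
    rcases List.mem_take_iff_getElem.mp hc with ⟨k, hk, rfl⟩
    have hkm : k ≤ m := by omega
    have hkn : k < cs.length := by omega
    have hget : cs.getD k 'a' = cs[k] := List.getD_eq_getElem cs 'a' hkn
    have hle : lastPos cs cs[k] ≤ m := by rw [← hget]; exact h k hkm
    have := (lastPos_le_iff cs _ (List.getElem_mem hkn) m).mp hle
    simp only [Bool.not_eq_eq_eq_not, Bool.not_true, List.contains_eq_mem,
      decide_eq_false_iff_not]
    exact this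

lemma maxLp_succ (cs : List Char) (m : Nat) :
    maxLp cs (m+1) = max (maxLp cs m) ((lastPos cs (cs.getD m 'a') : Int)) := by
  unfold maxLp
  rw [List.range_succ, List.foldl_append]
  simp

lemma maxLp_eq_iff (cs : List Char) (m : Nat) (hm : m < cs.length) :
    (maxLp cs (m+1) = (m : Int)) ↔ Pb cs m = true := by
  have hgem : (m : Int) ≤ maxLp cs (m+1) := by
    have h := (le_foldl_max' (fun k => (lastPos cs (cs.getD k 'a') : Int)) (List.range (m+1)) 0).2
    have hmem : m ∈ List.range (m+1) := by simp
    have := h m hmem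
    have hge := lastPos_ge cs m hm
    unfold maxLp
    omega
  rw [Pb_iff cs m hm]
  constructor
  · intro heq k hk
    have h := (foldl_max_le_iff (fun k => (lastPos cs (cs.getD k 'a') : Int))
        (List.range (m+1)) 0 (m : Int)).mp (le_of_eq heq)
    have := h.2 k (by simp; omega)
    exact_mod_cast this
  · intro h
    have hle : maxLp cs (m+1) ≤ (m : Int) := by
      unfold maxLp
      rw [foldl_max_le_iff]
      refine ⟨by positivity, fun k hk => ?_⟩
      have hkm : k ≤ m := by simp at hk; omega
      exact_mod_cast h k hkm
    omega

def lastC (cs : List Char) (m : Nat) : Int := ((cutsN cs m).map Int.ofNat).getLastD (-1)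

-- A's loop state after processing the first m characters
def AstateN (cs : List Char) (m : Nat) : List Int × Int × Int :=
  (List.range m).foldl
    (fun st (k : Nat) => xyzStep (xyzLastIndex cs) st ((k : Int), cs.getD k 'a'))
    ([], 0, 0)

lemma cutsN_succ (cs : List Char) (m : Nat) :
    cutsN cs (m+1) = cutsN cs m ++ if Pb cs m then [m] else [] := by
  unfold cutsN
  rw [List.range_succ, List.filter_append]
  by_cases h : Pb cs m <;> simp [h]

lemma invA (cs : List Char) (m : Nat) (hm : m ≤ cs.length) :
    AstateN cs m = (diffs (-1) ((cutsN cs m).map Int.ofNat), lastC cs m + 1, maxLp cs m) := by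
  induction m with
  | zero => simp [AstateN, cutsN, lastC, maxLp, diffs]
  | succ m ih =>
    have hmlt : m < cs.length := hm
    have ih' := ih (Nat.le_of_lt hmlt)
    unfold AstateN at ih' ⊢
    rw [List.range_succ, List.foldl_append, List.foldl_cons, List.foldl_nil, ih']
    have hmemc : cs.getD m 'a' ∈ cs := by
      rw [List.getD_eq_getElem cs 'a' hmlt]; exact List.getElem_mem hmlt
    have hdict : (xyzLastIndex cs).getD (cs.getD m 'a') 0 = (lastPos cs (cs.getD m 'a') : Int) := by
      unfold xyzLastIndex
      rw [getD_fold_mem cs 0 _ _ hmemc]; ring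
    unfold xyzStep
    simp only [hdict]
    have hmax : max (maxLp cs m) ((lastPos cs (cs.getD m 'a') : Int)) = maxLp cs (m+1) :=
      (maxLp_succ cs m).symm
    rw [hmax]
    by_cases hP : Pb cs m = true
    · have hcond : ((m : Int) == maxLp cs (m+1)) = true := by
        rw [beq_iff_eq]
        exact ((maxLp_eq_iff cs m hmlt).mpr hP).symm
      rw [hcond]
      simp only [if_true]
      have hcuts : cutsN cs (m+1) = cutsN cs m ++ [m] := by rw [cutsN_succ]; simp [hP]
      have heq : maxLp cs (m+1) = (m : Int) := (maxLp_eq_iff cs m hmlt).mpr hP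
      unfold lastC
      rw [hcuts]
      simp only [List.map_append, List.map_cons, List.map_nil]
      rw [diffs_append, List.getLastD_concat, heq]
      have harith : (m : Int) - (((cutsN cs m).map Int.ofNat).getLastD (-1) + 1) + 1
          = Int.ofNat m - ((cutsN cs m).map Int.ofNat).getLastD (-1) := by
        simp only [Int.ofNat_eq_natCast]; ring
      rw [harith]
      simp [Int.ofNat_eq_natCast]
    · have hcond : ((m : Int) == maxLp cs (m+1)) = false := by
        rw [beq_eq_false_iff_ne]
        intro heq
        exact hP ((maxLp_eq_iff cs m hmlt).mp heq.symm)
      rw [hcond]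
      simp only [Bool.false_eq_true, if_false]
      have hcuts : cutsN cs (m+1) = cutsN cs m := by rw [cutsN_succ]; simp [hP]
      unfold lastC
      rw [hcuts]

lemma hrangeN (n : Nat) :
    PySem.List.pyRange 0 (n : Int) 1 = (List.range n).map (fun k : Nat => (k : Int)) := by
  rw [PySem.List.pyRange_one]
  simp only [Int.sub_zero, Int.toNat_natCast, zero_add]

lemma xyzA_eq (cs : List Char) :
    ((PySem.List.enumerate cs 0).foldl (xyzStep (xyzLastIndex cs)) ([], 0, 0)).1
      = diffs (-1) ((cutsN cs cs.length).map Int.ofNat) := by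
  rw [PySem.List.enumerate_eq_map_pyRange cs 'a', List.foldl_map]
  have hlen : PySem.List.len cs = (cs.length : Int) := rfl
  rw [hlen, hrangeN, List.foldl_map]
  simp only [PySem.List.pyGetD_natCast]
  show (AstateN cs cs.length).1 = diffs (-1) ((cutsN cs cs.length).map Int.ofNat)
  rw [invA cs cs.length le_rfl]

lemma xyzB_eq (cs : List Char) :
    (((PySem.List.pyRange 0 (cs.length : Int) 1).filter
        (fun i => (PySem.List.slice cs none (some (i+1))).all
          (fun c => !((PySem.List.slice cs (some (i+1)) none).contains c)))).foldl
        (fun (st : List Int × Int) c => (st.1 ++ [c - st.2], c)) (([] : List Int), -1)).1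
      = diffs (-1) ((cutsN cs cs.length).map Int.ofNat) := by
  rw [hrangeN, List.filter_map]
  have hfilter : (List.range cs.length).filter
      ((fun i => (PySem.List.slice cs none (some (i+1))).all
          (fun c => !((PySem.List.slice cs (some (i+1)) none).contains c))) ∘ (fun k : Nat => (k : Int)))
      = cutsN cs cs.length := by
    unfold cutsN
    apply List.filter_congr
    intro k _
    show ((PySem.List.slice cs none (some ((k : Int) + 1))).all
        (fun c => !((PySem.List.slice cs (some ((k : Int) + 1)) none).contains c))) = Pb cs k
    have h1 : ((k : Int) + 1) = ((k + 1 : Nat) : Int) := by push_cast; ring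
    rw [h1, PySem.List.slice_to_natCast, PySem.List.slice_from_natCast]
    rfl
  rw [hfilter, foldB]
  have hcast : (fun k : Nat => (k : Int)) = Int.ofNat := funext fun _ => rfl
  rw [hcast]
  exact List.nil_append _

-- ===== VERDICT (by name: the statement is the Claim_ definition above) =====
theorem xyz_spec : Claim_equal_xyz := by
  intro s _hd
  unfold Spec_xyz
  have hA : xyz s = ((PySem.List.enumerate s.toList 0).foldl
      (xyzStep (xyzLastIndex s.toList)) ([], 0, 0)).1 := rfl
  have hB : xyz_alt s = (((PySem.List.pyRange 0 (s.toList.length : Int) 1).filter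
      (fun i => (PySem.List.slice s.toList none (some (i+1))).all
        (fun c => !((PySem.List.slice s.toList (some (i+1)) none).contains c)))).foldl
      (fun (st : List Int × Int) c => (st.1 ++ [c - st.2], c)) (([] : List Int), -1)).1 := rfl
  rw [hA, hB, xyzA_eq, xyzB_eq]
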